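-- pv_equiv track=rewrite | github.com/Patrick-Mertens/Game_Theory_Code | Utils.py | Detect_Trend_Of_Data_x
-- ===== SOURCE A (Python) =====
-- def Detect_Trend_Of_Data_x(vector):
--
--     diff = []
--     for d in range(len(vector)-1):
--         diff.append(vector[d + 1] - vector[d])
--     s_pos = 0
--     for x in diff:
--         if x>0:
--             s_pos = s_pos + x
--
--     s_neg = 0
--     for x in diff:
--         if x<0:
--             s_neg = s_neg + x
--
--     if all(i >= 0 for i in diff):
--         trend = 'Up'
--     elif all(i <= 0 for i in diff):
--         trend = 'Down'
--     elif diff[0] > 0 and not abs(s_neg) >= (s_pos /2):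
--         trend = 'Up'
--     elif diff[0] < 0 and not s_pos >= (abs(s_neg) /2):
--         trend = 'Down'
--     else:
--         trend = 'Fluctuate'
--     return trend
-- ===== SOURCE B (Python) =====
-- def Detect_Trend_Of_Data_x(vector):
--     # Single pass over the data: track previous element, first diff, positive/negative
--     # sums and the two all-* flags, then apply the same classification cascade.
--     s_pos = 0
--     s_neg = 0
--     all_nonneg = True
--     all_nonpos = True
--     first = None
--     prev = None
--     for x in vector:
--         if prev is not None:
--             d = x - prev
--             if first is None:
--                 first = d
--             if d > 0:
--                 s_pos += d
--                 all_nonpos = False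
--             elif d < 0:
--                 s_neg += d
--                 all_nonneg = False
--         prev = x
--     if all_nonneg:
--         return 'Up'
--     if all_nonpos:
--         return 'Down'
--     # first is not None here (a diff exists, otherwise all_nonneg held)
--     if first > 0 and 2 * (-s_neg) < s_pos:
--         return 'Up'
--     if first < 0 and 2 * s_pos < -s_neg:
--         return 'Down'
--     return 'Fluctuate'
-- ===== Notes on version B (the rewrite author's own statement) =====
-- stated objective: faster
-- what changed: Replaces A's materialised diff list and five separate passes (build diff, sum positives, sum negatives, two all() scans, plus indexing) by one single pass over the input that maintains the sums, the two monotonicity flags and the first diff, feeding the same classification cascade.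
import Mathlib
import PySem

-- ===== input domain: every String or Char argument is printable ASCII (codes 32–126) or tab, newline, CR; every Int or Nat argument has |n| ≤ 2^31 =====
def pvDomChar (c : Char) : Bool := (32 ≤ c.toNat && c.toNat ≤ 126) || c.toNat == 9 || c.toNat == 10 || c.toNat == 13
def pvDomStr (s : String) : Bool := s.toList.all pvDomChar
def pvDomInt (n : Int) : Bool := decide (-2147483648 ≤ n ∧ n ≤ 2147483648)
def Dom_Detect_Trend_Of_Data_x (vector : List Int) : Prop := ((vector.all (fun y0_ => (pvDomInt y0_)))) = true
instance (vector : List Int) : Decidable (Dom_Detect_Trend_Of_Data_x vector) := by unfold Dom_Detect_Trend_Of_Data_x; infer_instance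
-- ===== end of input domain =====

-- B replaces A's materialised diff list and five separate passes by one single fold; equal return value proved.

-- ===== PORT A =====
-- literal port of A: build diff via the range loop, two accumulation loops, then the cascade.
-- 'abs(s_neg) >= s_pos/2' (Python true division on ints) is ported exactly as '2*|s_neg| ≥ s_pos';
-- 'diff[0]' is ported as pyGetD diff 0 0 — only reached when diff is nonempty, where it is exact.
def Detect_Trend_Of_Data_x (vector : List Int) : String :=
  let diff := (PySem.List.pyRange 0 ((vector.length : Int) - 1) 1).foldl
      (fun acc d => acc ++ [PySem.List.pyGetD vector (d + 1) 0 - PySem.List.pyGetD vector d 0]) []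
  let s_pos := diff.foldl (fun s x => if 0 < x then s + x else s) 0
  let s_neg := diff.foldl (fun s x => if x < 0 then s + x else s) 0
  if diff.all (fun i => decide (0 ≤ i)) then "Up"
  else if diff.all (fun i => decide (i ≤ 0)) then "Down"
  else if 0 < PySem.List.pyGetD diff 0 0 ∧ ¬ (2 * |s_neg| ≥ s_pos) then "Up"
  else if PySem.List.pyGetD diff 0 0 < 0 ∧ ¬ (2 * s_pos ≥ |s_neg|) then "Down"
  else "Fluctuate"

-- ===== PORT B =====
-- one step of B's single loop: state = (prev, first, s_pos, s_neg, all_nonneg, all_nonpos)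
def pvAltStep (st : Option Int × Option Int × Int × Int × Bool × Bool) (x : Int) :
    Option Int × Option Int × Int × Int × Bool × Bool :=
  match st with
  | (prev, first, sp, sn, an, ap) =>
    match prev with
    | none => (some x, first, sp, sn, an, ap)
    | some p =>
      let d := x - p
      let first' := match first with | none => some d | some f => some f
      if 0 < d then (some x, first', sp + d, sn, an, false)
      else if d < 0 then (some x, first', sp, sn + d, false, ap)
      else (some x, first', sp, sn, an, ap)

-- 'first' is some _ whenever the last two branches are reached; .getD 0 is exact there
def Detect_Trend_Of_Data_x_alt (vector : List Int) : String :=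
  match vector.foldl pvAltStep (none, none, 0, 0, true, true) with
  | (_, first, sp, sn, an, ap) =>
    if an then "Up"
    else if ap then "Down"
    else if 0 < first.getD 0 ∧ 2 * (-sn) < sp then "Up"
    else if first.getD 0 < 0 ∧ 2 * sp < -sn then "Down"
    else "Fluctuate"

-- ===== PRECONDITION & SPEC =====
def Spec_Detect_Trend_Of_Data_x (vector : List Int) (out : String) : Prop := out = Detect_Trend_Of_Data_x_alt vector
instance (vector : List Int) (out : String) : Decidable (Spec_Detect_Trend_Of_Data_x vector out) := by unfold Spec_Detect_Trend_Of_Data_x; infer_instance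

-- ===== CLAIM (what is proved, stated in full; the proofs are below) =====
def Claim_equal_Detect_Trend_Of_Data_x : Prop := ∀ (vector : List Int), Dom_Detect_Trend_Of_Data_x vector → Spec_Detect_Trend_Of_Data_x vector (Detect_Trend_Of_Data_x vector)

-- ===== LEMMAS AND PROOFS =====

-- the list of consecutive differences
def pvDiffs : List Int → List Int
  | [] => []
  | [_] => []
  | a :: b :: t => (b - a) :: pvDiffs (b :: t)

def pvSP (dl : List Int) : Int := (dl.filter (fun x => decide (0 < x))).sum
def pvSN (dl : List Int) : Int := (dl.filter (fun x => decide (x < 0))).sum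
def pvNN (dl : List Int) : Bool := dl.all (fun x => decide (0 ≤ x))
def pvNP (dl : List Int) : Bool := dl.all (fun x => decide (x ≤ 0))
def pvFirstOr (first : Option Int) (dl : List Int) : Option Int :=
  match first with | none => dl.head? | some f => some f

lemma range_map_diffs : ∀ v : List Int,
    (List.range (v.length - 1)).map (fun k => v.getD (k+1) 0 - v.getD k 0) = pvDiffs v
  | [] => by simp [pvDiffs]
  | [_] => by simp [pvDiffs]
  | a :: b :: t => by
      have ih := range_map_diffs (b :: t)
      have hlen : (a :: b :: t).length - 1 = t.length + 1 := by simp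
      rw [hlen, List.range_succ_eq_map, List.map_cons, List.map_map]
      have htail : ((fun k => (a :: b :: t).getD (k+1) 0 - (a :: b :: t).getD k 0) ∘ Nat.succ)
          = fun k => (b :: t).getD (k+1) 0 - (b :: t).getD k 0 := by
        funext k; simp [List.getD_cons_succ]
      rw [htail]
      have hlen2 : (b :: t).length - 1 = t.length := by simp
      rw [hlen2] at ih
      rw [show pvDiffs (a :: b :: t) = (b - a) :: pvDiffs (b :: t) from rfl, ← ih]
      simp [List.getD]

lemma A_diff_eq (v : List Int) :
    (PySem.List.pyRange 0 ((v.length : Int) - 1) 1).foldl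
      (fun acc d => acc ++ [PySem.List.pyGetD v (d + 1) 0 - PySem.List.pyGetD v d 0]) []
    = pvDiffs v := by
  rw [PySem.List.foldl_append_singleton_eq_map, PySem.List.pyRange_one, List.map_map]
  have hn : ((v.length : Int) - 1 - 0).toNat = v.length - 1 := by omega
  rw [hn]
  have hf : ((fun d => PySem.List.pyGetD v (d + 1) 0 - PySem.List.pyGetD v d 0)
      ∘ fun k : Nat => (0 : Int) + (k : Int))
      = fun k : Nat => v.getD (k+1) 0 - v.getD k 0 := by
    funext k
    have h1 : ((k : Int) + 1) = ((k + 1 : Nat) : Int) := by push_cast; ring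
    have h2 : (0 : Int) + (k : Int) = ((k : Nat) : Int) := by push_cast; ring
    simp only [Function.comp, h2, h1, PySem.List.pyGetD_natCast]
  rw [hf, range_map_diffs, List.nil_append]

lemma foldl_spos (dl : List Int) : ∀ init : Int,
    dl.foldl (fun s x => if 0 < x then s + x else s) init = init + pvSP dl := by
  induction dl with
  | nil => intro init; simp [pvSP]
  | cons h t ih =>
      intro init
      by_cases hh : 0 < h <;> simp [pvSP, List.filter_cons, hh, ih, List.sum_cons] <;> omega

lemma foldl_sneg (dl : List Int) : ∀ init : Int,
    dl.foldl (fun s x => if x < 0 then s + x else s) init = init + pvSN dl := by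
  induction dl with
  | nil => intro init; simp [pvSN]
  | cons h t ih =>
      intro init
      by_cases hh : h < 0 <;> simp [pvSN, List.filter_cons, hh, ih, List.sum_cons] <;> omega

lemma pvSN_nonpos (dl : List Int) : pvSN dl ≤ 0 := by
  induction dl with
  | nil => simp [pvSN]
  | cons h t ih =>
      unfold pvSN at *
      by_cases hh : h < 0 <;> simp [List.filter_cons, hh] <;> omega

lemma getLastD_irrel (t : List Int) (x p : Int) :
    t.getLast?.getD x = (x :: t).getLast?.getD p := by
  cases t with
  | nil => simp
  | cons a as =>
    obtain ⟨y, hy⟩ := Option.isSome_iff_exists.mp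
      (List.getLast?_isSome.mpr (by simp) : (a :: as).getLast?.isSome)
    simp [List.getLast?_cons_cons, hy]

lemma alt_foldl (rest : List Int) : ∀ (p : Int) (first : Option Int) (sp sn : Int) (an ap : Bool),
    rest.foldl pvAltStep (some p, first, sp, sn, an, ap) =
      (some (rest.getLastD p),
       pvFirstOr first (pvDiffs (p :: rest)),
       sp + pvSP (pvDiffs (p :: rest)),
       sn + pvSN (pvDiffs (p :: rest)),
       an && pvNN (pvDiffs (p :: rest)),
       ap && pvNP (pvDiffs (p :: rest))) := by
  induction rest with
  | nil =>
      intro p first sp sn an ap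
      cases first <;> simp [pvDiffs, pvSP, pvSN, pvNN, pvNP, pvFirstOr]
  | cons x t ih =>
      intro p first sp sn an ap
      have hd : pvDiffs (p :: x :: t) = (x - p) :: pvDiffs (x :: t) := rfl
      rw [List.foldl_cons]
      rcases lt_trichotomy 0 (x - p) with hlt | heq | hgt
      · have hstep : pvAltStep (some p, first, sp, sn, an, ap) x =
            (some x, (match first with | none => some (x - p) | some f => some f),
             sp + (x - p), sn, an, false) := by
          simp only [pvAltStep]; rw [if_pos hlt]
        rw [hstep, ih]
        have hgl := getLastD_irrel t x p
        have hx : p < x := by omega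
        have hx2 : ¬ (x < p) := by omega
        have hnot : ¬ (x - p < 0) := by omega
        have hle : (0:Int) ≤ x - p := by omega
        have hle2 : p ≤ x := by omega
        have hle3 : ¬ (x ≤ p) := by omega
        cases first <;>
          simp [hd, pvFirstOr, pvSP, pvSN, pvNN, pvNP, List.filter_cons, hlt, hx, hx2, hnot,
            hle, hle2, hle3, List.sum_cons, hgl] <;>
          omega
      · have hstep : pvAltStep (some p, first, sp, sn, an, ap) x =
            (some x, (match first with | none => some (x - p) | some f => some f),
             sp, sn, an, ap) := by
          simp only [pvAltStep]; rw [if_neg (by omega), if_neg (by omega)]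
        rw [hstep, ih]
        have hgl := getLastD_irrel t x p
        have h0 : x - p = 0 := by omega
        have hx : ¬ (p < x) := by omega
        have hx2 : ¬ (x < p) := by omega
        have hle2 : p ≤ x := by omega
        have hle3 : x ≤ p := by omega
        cases first <;>
          simp [hd, pvFirstOr, pvSP, pvSN, pvNN, pvNP, List.filter_cons, h0, hx, hx2, hle2,
            hle3, List.sum_cons, hgl]
      · have hstep : pvAltStep (some p, first, sp, sn, an, ap) x =
            (some x, (match first with | none => some (x - p) | some f => some f),
             sp, sn + (x - p), false, ap) := by
          simp only [pvAltStep]; rw [if_neg (by omega), if_pos hgt]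
        rw [hstep, ih]
        have hgl := getLastD_irrel t x p
        have hx : x < p := by omega
        have hx2 : ¬ (p < x) := by omega
        have h1 : ¬ (0 < x - p) := by omega
        have h2 : ¬ (0 ≤ x - p) := by omega
        have hle : x - p ≤ 0 := by omega
        have hle2 : x ≤ p := by omega
        have hle3 : ¬ (p ≤ x) := by omega
        cases first <;>
          simp [hd, pvFirstOr, pvSP, pvSN, pvNN, pvNP, List.filter_cons, hgt, hx, hx2, h1, h2,
            hle, hle2, hle3, List.sum_cons, hgl] <;>
          omega

lemma pvNN_false_ne_nil {dl : List Int} (h : pvNN dl = false) : dl ≠ [] := by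
  intro hnil; rw [hnil] at h; simp [pvNN] at h

-- ===== VERDICT (by name: the statement is the Claim_ definition above) =====
theorem Detect_Trend_Of_Data_x_spec : Claim_equal_Detect_Trend_Of_Data_x := by
  intro v _
  unfold Spec_Detect_Trend_Of_Data_x
  cases v with
  | nil => decide
  | cons p rest =>
    show Detect_Trend_Of_Data_x (p :: rest) = Detect_Trend_Of_Data_x_alt (p :: rest)
    unfold Detect_Trend_Of_Data_x Detect_Trend_Of_Data_x_alt
    rw [List.foldl_cons]
    have hinit : pvAltStep (none, none, 0, 0, true, true) p = (some p, none, 0, 0, true, true) := rfl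
    rw [hinit, alt_foldl]
    simp only [A_diff_eq, foldl_spos, foldl_sneg]
    set dl := pvDiffs (p :: rest) with hdl
    have hNN : dl.all (fun i => decide ((0:Int) ≤ i)) = pvNN dl := rfl
    have hNP : dl.all (fun i => decide (i ≤ (0:Int))) = pvNP dl := rfl
    rw [hNN, hNP]
    simp only [zero_add, Bool.true_and, pvFirstOr]
    have hSN : pvSN dl ≤ 0 := pvSN_nonpos dl
    have habs : |pvSN dl| = -(pvSN dl) := abs_of_nonpos hSN
    rw [habs]
    by_cases hnn : pvNN dl = true
    · simp [hnn]
    · have hnn' : pvNN dl = false := by simpa using hnn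
      have hne : dl ≠ [] := pvNN_false_ne_nil hnn'
      obtain ⟨h, t, hht⟩ := List.exists_cons_of_ne_nil hne
      rw [hht]
      simp only [List.head?_cons, Option.getD_some, PySem.List.pyGetD_zero_cons,
        ge_iff_le, not_le]
      rfl
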